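-- pv_equiv track=rewrite | github.com/Zandereins/skillforge | skills/skillforge/scripts/achievements.py | _check_comeback
-- ===== SOURCE A (Python) =====
-- def _check_comeback(state: list[dict]) -> bool:
--     """Check if a keep followed 3+ consecutive discards."""
--     discards = 0
--     for e in state:
--         if e.get("status") == "discard":
--             discards += 1
--         elif e.get("status") == "keep" and discards >= 3:
--             return True
--         else:
--             discards = 0
--     return False
-- ===== SOURCE B (Python) =====
-- def _check_comeback(state: list[dict]) -> bool:
--     """Check if a keep followed 3+ consecutive discards."""
--     s = "".join(
--         "d" if e.get("status") == "discard"
--         else "k" if e.get("status") == "keep"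
--         else "o"
--         for e in state
--     )
--     return "dddk" in s
-- ===== Notes on version B (the rewrite author's own statement) =====
-- stated objective: idiomatic
-- what changed: Replaces the running-counter loop with early return by mapping each entry's status to one character ('d'/'k'/'o'), joining into a string, and testing for the substring 'dddk'.
import Mathlib
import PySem

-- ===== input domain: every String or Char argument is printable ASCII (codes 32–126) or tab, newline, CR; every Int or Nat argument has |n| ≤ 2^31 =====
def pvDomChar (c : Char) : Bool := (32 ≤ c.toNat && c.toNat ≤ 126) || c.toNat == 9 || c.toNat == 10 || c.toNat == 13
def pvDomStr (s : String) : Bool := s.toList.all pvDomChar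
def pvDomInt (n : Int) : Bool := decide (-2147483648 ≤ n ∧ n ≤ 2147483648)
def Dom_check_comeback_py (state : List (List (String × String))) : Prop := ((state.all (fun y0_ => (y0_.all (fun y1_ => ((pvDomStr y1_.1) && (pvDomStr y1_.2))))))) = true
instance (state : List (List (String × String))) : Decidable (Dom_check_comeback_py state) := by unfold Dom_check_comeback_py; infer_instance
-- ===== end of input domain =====

-- B replaces A's running-counter scan by a map-to-characters plus a single substring test ("dddk" in the derived string); objective: idiomatic, not faster.

-- ===== PORT A =====
-- the for-loop with early return, carrying the running `discards` counter
def ccGo : List (List (String × String)) → Int → Bool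
  | [], _ => false
  | e :: rest, discards =>
    if PySem.Dict.get? (PySem.Dict.mk e) "status" = some "discard" then
      ccGo rest (discards + 1)
    else if PySem.Dict.get? (PySem.Dict.mk e) "status" = some "keep" ∧ discards ≥ 3 then
      true
    else
      ccGo rest 0

def check_comeback_py (state : List (List (String × String))) : Bool :=
  ccGo state 0

-- ===== PORT B =====
-- the conditional expression inside B's join: one character per entry
def ccChar (e : List (String × String)) : Char :=
  if PySem.Dict.get? (PySem.Dict.mk e) "status" = some "discard" then 'd'
  else if PySem.Dict.get? (PySem.Dict.mk e) "status" = some "keep" then 'k'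
  else 'o'

def check_comeback_py_alt (state : List (List (String × String))) : Bool :=
  PySem.Str.isIn "dddk" (String.ofList (state.map ccChar))

-- ===== PRECONDITION & SPEC =====
def Spec_check_comeback_py (state : List (List (String × String))) (out : Bool) : Prop := out = check_comeback_py_alt state
instance (state : List (List (String × String))) (out : Bool) : Decidable (Spec_check_comeback_py state out) := by unfold Spec_check_comeback_py; infer_instance

-- ===== CLAIM (what is proved, stated in full; the proofs are below) =====
def Claim_equal_check_comeback_py : Prop := ∀ (state : List (List (String × String))), Dom_check_comeback_py state → Spec_check_comeback_py state (check_comeback_py state)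

-- ===== LEMMAS AND PROOFS =====

-- the pattern "dddk".toList
def ccPat : List Char := ['d', 'd', 'd', 'k']

-- "dddk" is never a prefix of d^m ++ c :: t when c ≠ 'd' and (c = 'k' → m ≠ 3)
lemma cc_not_prefix (m : Nat) (c : Char) (t : List Char) (hc : c ≠ 'd') (hk : c = 'k' → m ≠ 3) :
    ¬ ccPat <+: List.replicate m 'd' ++ c :: t := by
  match m with
  | 0 => simp [ccPat, List.cons_prefix_cons]; intro h; exact absurd h.symm hc
  | 1 => simp [ccPat, List.cons_prefix_cons]; intro h; exact absurd h.symm hc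
  | 2 => simp [ccPat, List.cons_prefix_cons]; intro h; exact absurd h.symm hc
  | 3 =>
    simp [ccPat, List.cons_prefix_cons]
    intro h
    exact hk h.symm rfl
  | (k + 4) =>
    simp [ccPat, List.replicate_succ, List.cons_prefix_cons]

-- "dddk" is never a prefix of d^m
lemma cc_not_prefix_rep (m : Nat) : ¬ ccPat <+: List.replicate m 'd' := by
  intro h
  have := h.subset (show 'k' ∈ ccPat by simp [ccPat])
  exact absurd (List.eq_of_mem_replicate this) (by decide)

-- "dddk" is not an infix of pure d^n
lemma cc_not_infix_rep (n : Nat) : ¬ ccPat <:+: List.replicate n 'd' := by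
  induction n with
  | zero => simp [ccPat]
  | succ n ih =>
    rw [List.replicate_succ, List.infix_cons_iff]
    rintro (h | h)
    · exact cc_not_prefix_rep (n + 1) (by rwa [List.replicate_succ])
    · exact ih h

-- crossing a non-'d' character with fewer than the required run kills every match
lemma cc_infix_reset (n : Nat) (c : Char) (t : List Char) (hc : c ≠ 'd') (hk : c = 'k' → n < 3) :
    (ccPat <:+: List.replicate n 'd' ++ c :: t) ↔ ccPat <:+: t := by
  induction n with
  | zero =>
    rw [List.replicate, List.nil_append, List.infix_cons_iff]
    constructor
    · rintro (h | h)
      · exact absurd h (cc_not_prefix 0 c t hc (by intro h3; omega))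
      · exact h
    · exact fun h => Or.inr h
  | succ n ih =>
    rw [List.replicate_succ, List.cons_append, List.infix_cons_iff]
    constructor
    · rintro (h | h)
      · exact absurd h (by
          rw [← List.cons_append, ← List.replicate_succ]
          exact cc_not_prefix (n + 1) c t hc (fun hck => by have := hk hck; omega))
      · exact (ih (fun hck => by have := hk hck; omega)).mp h
    · intro h
      exact Or.inr ((ih (fun hck => by have := hk hck; omega)).mpr h)

-- a 'keep' after a run of at least three 'd's produces the pattern
lemma cc_infix_keep (n : Nat) (t : List Char) (hn : 3 ≤ n) :
    ccPat <:+: List.replicate n 'd' ++ 'k' :: t := by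
  refine ⟨List.replicate (n - 3) 'd', t, ?_⟩
  have : List.replicate n 'd' = List.replicate (n - 3) 'd' ++ List.replicate 3 'd' := by
    rw [← List.replicate_add]; congr 1; omega
  rw [this]
  simp [ccPat]

-- main invariant: the loop with counter n sees what the string d^n ++ map ccChar l contains
lemma ccGo_eq_infix (l : List (List (String × String))) (n : Nat) :
    ccGo l (n : Int) = true ↔ ccPat <:+: List.replicate n 'd' ++ l.map ccChar := by
  induction l generalizing n with
  | nil =>
    simp only [ccGo, List.map_nil, List.append_nil]
    simp [cc_not_infix_rep n]
  | cons e rest ih =>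
    by_cases hd : PySem.Dict.get? (PySem.Dict.mk e) "status" = some "discard"
    · have h1 : ccGo (e :: rest) (n : Int) = ccGo rest ((n : Int) + 1) := by
        simp [ccGo, hd]
      have hch : ccChar e = 'd' := by simp [ccChar, hd]
      rw [h1, show ((n : Int) + 1) = ((n + 1 : Nat) : Int) by push_cast; ring, ih]
      rw [List.map_cons, hch]
      constructor
      · intro h
        rw [List.replicate_add] at h
        simpa using h
      · intro h
        rw [List.replicate_add]
        simpa using h
    · by_cases hk : PySem.Dict.get? (PySem.Dict.mk e) "status" = some "keep"
      · have hch : ccChar e = 'k' := by simp [ccChar, hk]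
        rw [List.map_cons, hch]
        by_cases h3 : (3 : Nat) ≤ n
        · have h1 : ccGo (e :: rest) (n : Int) = true := by
            simp only [ccGo, hd, if_false]
            rw [if_pos ⟨hk, by exact_mod_cast h3⟩]
          rw [h1]
          simp [cc_infix_keep n _ h3]
        · have h1 : ccGo (e :: rest) (n : Int) = ccGo rest 0 := by
            simp only [ccGo, hd, if_false]
            rw [if_neg (by rintro ⟨-, hge⟩; exact h3 (by exact_mod_cast hge))]
          rw [h1, show (0 : Int) = ((0 : Nat) : Int) by norm_num, ih]
          rw [cc_infix_reset n 'k' _ (by decide) (fun _ => by omega)]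
          simp
      · have hch : ccChar e = 'o' := by simp [ccChar, hd, hk]
        have h1 : ccGo (e :: rest) (n : Int) = ccGo rest 0 := by
          simp only [ccGo, hd, if_false]
          rw [if_neg (by rintro ⟨hkk, -⟩; exact hk hkk)]
        rw [List.map_cons, hch, h1,
          show (0 : Int) = ((0 : Nat) : Int) by norm_num, ih]
        rw [cc_infix_reset n 'o' _ (by decide) (fun h => absurd h (by decide))]
        simp

-- ===== VERDICT (by name: the statement is the Claim_ definition above) =====
theorem check_comeback_py_spec : Claim_equal_check_comeback_py := by
  intro state _
  unfold Spec_check_comeback_py check_comeback_py check_comeback_py_alt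
  rw [Bool.eq_iff_iff]
  have halt : PySem.Str.isIn "dddk" (String.ofList (state.map ccChar)) = true ↔
      ccPat <:+: state.map ccChar := by
    rw [PySem.Str.isIn_iff_infix]
    simp [ccPat]
  rw [show (0 : Int) = ((0 : Nat) : Int) by norm_num, ccGo_eq_infix state 0, halt]
  simp
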